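-- pv_equiv track=rewrite | github.com/ruby199/GitHub_rubin | Medium/minimum_genetic_mutation.py | minMutation_wrong
-- ===== SOURCE A (Python) =====
-- def minMutation_wrong(startGene, endGene, bank) -> int:
--     """
--     This solution has a logical flaw but it is not correctly simulating the sequence of mutations from the startGene to the endGene using the bank.
--     """
--     if len(startGene) != len(endGene) or not bank:
--         return -1
--
--     count = 0
--
--     for i, (s_char, e_char) in enumerate(zip(startGene, endGene)):
--         if s_char != e_char:
--             temp_gene1 = startGene[:i] + e_char + startGene[i+1:]
--             temp_gene2 = endGene[:i] + s_char + endGene[i+1:]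
--
--             if temp_gene1 in bank:
--                 count += 1
--
--             if temp_gene2 in bank:
--                 count += 1
--
--     return count
-- ===== SOURCE B (Python) =====
-- def minMutation_wrong(startGene, endGene, bank) -> int:
--     # Flip the iteration: scan the distinct bank genes once and classify each,
--     # instead of materialising candidate strings per position and scanning bank.
--     if len(startGene) != len(endGene) or not bank:
--         return -1
--     total = 0
--     for g in set(bank):
--         if len(g) == len(startGene):
--             d1 = [i for i, (x, y) in enumerate(zip(g, startGene)) if x != y]
--             if len(d1) == 1 and g[d1[0]] == endGene[d1[0]]:
--                 total += 1
--             d2 = [i for i, (x, y) in enumerate(zip(g, endGene)) if x != y]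
--             if len(d2) == 1 and g[d2[0]] == startGene[d2[0]]:
--                 total += 1
--     return total
-- ===== Notes on version B (the rewrite author's own statement) =====
-- stated objective: faster
-- what changed: Instead of building both one-position mutation candidates at every differing position and scanning the bank list for each, B makes a single pass over the distinct bank genes (set(bank)) and classifies each gene by its difference positions against startGene and endGene.
import Mathlib
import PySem

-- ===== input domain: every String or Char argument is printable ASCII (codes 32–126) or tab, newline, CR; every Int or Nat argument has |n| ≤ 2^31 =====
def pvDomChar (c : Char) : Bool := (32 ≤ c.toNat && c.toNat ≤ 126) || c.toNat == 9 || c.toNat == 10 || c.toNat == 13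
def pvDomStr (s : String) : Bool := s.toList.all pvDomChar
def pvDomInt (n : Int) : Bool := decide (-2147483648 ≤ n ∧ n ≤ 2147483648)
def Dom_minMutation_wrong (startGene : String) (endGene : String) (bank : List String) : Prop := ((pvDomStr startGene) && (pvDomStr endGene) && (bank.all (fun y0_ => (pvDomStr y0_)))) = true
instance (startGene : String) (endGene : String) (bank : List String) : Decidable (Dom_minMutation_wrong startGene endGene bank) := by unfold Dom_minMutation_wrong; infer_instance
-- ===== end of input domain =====

-- B replaces A's per-position candidate construction + bank scans by one pass over the
-- distinct bank genes, classifying each gene by its difference positions (same return value).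

-- ===== PORT A =====
def minMutation_wrong (startGene : String) (endGene : String) (bank : List String) : Int :=
  if PySem.Str.len startGene ≠ PySem.Str.len endGene ∨ bank = [] then -1
  else
    (PySem.List.enumerate (startGene.toList.zip endGene.toList) 0).foldl
      (fun count p =>
        if p.2.1 ≠ p.2.2 then
          let temp1 := String.ofList
            (PySem.List.slice startGene.toList none (some p.1) ++ [p.2.2] ++
              PySem.List.slice startGene.toList (some (p.1 + 1)) none)
          let temp2 := String.ofList
            (PySem.List.slice endGene.toList none (some p.1) ++ [p.2.1] ++
              PySem.List.slice endGene.toList (some (p.1 + 1)) none)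
          let count := if bank.contains temp1 then count + 1 else count
          if bank.contains temp2 then count + 1 else count
        else count) 0

-- ===== PORT B =====
-- [i for i, (gc, hc) in enumerate(zip(g, h)) if gc != hc]
def pvDiffs (g h : List Char) : List Int :=
  ((PySem.List.enumerate (g.zip h) 0).filter (fun p => p.2.1 ≠ p.2.2)).map (fun p => p.1)

-- len(d) == 1 and g[d[0]] == check[d[0]]
def pvOne (d : List Int) (g check : List Char) : Bool :=
  match d with
  | [i] => PySem.List.pyGetD g i ' ' == PySem.List.pyGetD check i ' '
  | _ => false

def minMutation_wrong_alt (startGene : String) (endGene : String) (bank : List String) : Int :=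
  if PySem.Str.len startGene ≠ PySem.Str.len endGene ∨ bank = [] then -1
  else
    (PySem.Set.ofList bank).foldl
      (fun total g =>
        if PySem.Str.len g = PySem.Str.len startGene then
          let total := if pvOne (pvDiffs g.toList startGene.toList) g.toList endGene.toList
                       then total + 1 else total
          if pvOne (pvDiffs g.toList endGene.toList) g.toList startGene.toList
          then total + 1 else total
        else total) 0

-- ===== PRECONDITION & SPEC =====
def Spec_minMutation_wrong (startGene : String) (endGene : String) (bank : List String) (out : Int) : Prop := out = minMutation_wrong_alt startGene endGene bank
instance (startGene : String) (endGene : String) (bank : List String) (out : Int) : Decidable (Spec_minMutation_wrong startGene endGene bank out) := by unfold Spec_minMutation_wrong; infer_instance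

-- ===== CLAIM (what is proved, stated in full; the proofs are below) =====
def Claim_equal_minMutation_wrong : Prop := ∀ (startGene : String) (endGene : String) (bank : List String), Dom_minMutation_wrong startGene endGene bank → Spec_minMutation_wrong startGene endGene bank (minMutation_wrong startGene endGene bank)

-- ===== LEMMAS AND PROOFS =====

lemma pvDiffs_eq (g h : List Char) :
    pvDiffs g h =
      ((List.range (g.zip h).length).filter
        (fun k => decide (g.getD k ' ' ≠ h.getD k ' '))).map (fun (k : Nat) => (k : Int)) := by
  unfold pvDiffs
  conv_lhs => rw [PySem.List.enumerate_eq_map_pyRange (g.zip h) (' ', ' '),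
    List.filter_map, List.map_map, PySem.List.pyRange_one]
  conv_lhs => simp only [PySem.List.len, sub_zero, Int.toNat_natCast, List.filter_map, List.map_map]
  refine Eq.trans (congrArg (List.map _) (List.filter_congr ?_)) (List.map_congr_left ?_)
  · intro k hk
    rw [List.mem_range] at hk
    have h1 : PySem.List.pyGetD (g.zip h) ((0:Int) + (k:Nat)) (' ', ' ') = (g.zip h)[k] := by
      rw [zero_add, PySem.List.pyGetD_natCast]
      exact List.getD_eq_getElem _ _ (by simpa using hk)
    simp only [Function.comp, h1]
    rw [List.getElem_zip]
    have hg : k < g.length := lt_of_lt_of_le hk (by simp [List.length_zip])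
    have hh : k < h.length := lt_of_lt_of_le hk (by simp [List.length_zip])
    rw [List.getD_eq_getElem g ' ' hg, List.getD_eq_getElem h ' ' hh]
  · intro k hk
    simp

def pvCand (s e : List Char) (k : Nat) : List Char := s.set k (e.getD k ' ')

lemma pvCand_length (s e : List Char) (k : Nat) : (pvCand s e k).length = s.length := by
  simp [pvCand]

lemma pvCand_getD_self (s e : List Char) (k : Nat) (hk : k < s.length) :
    (pvCand s e k).getD k ' ' = e.getD k ' ' := by
  simp only [pvCand]
  rw [List.getD_eq_getElem _ ' ' (by simpa using hk), List.getElem_set_self]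

lemma pvCand_getD_ne (s e : List Char) (k j : Nat) (hj : j < s.length) (hjk : j ≠ k) :
    (pvCand s e k).getD j ' ' = s.getD j ' ' := by
  simp only [pvCand]
  rw [List.getD_eq_getElem _ ' ' (by simpa using hj), List.getElem_set_ne (by omega),
    ← List.getD_eq_getElem s ' ' hj]

lemma pvOne_iff (s e g : List Char) (hg : g.length = s.length) :
    pvOne (pvDiffs g s) g e = true ↔
      ∃ k, k < s.length ∧ s.getD k ' ' ≠ e.getD k ' ' ∧ g = pvCand s e k := by
  have hm : (g.zip s).length = s.length := by simp [List.length_zip, hg]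
  rw [pvDiffs_eq, hm]
  constructor
  · intro hone
    rcases hD : (List.range s.length).filter (fun k => decide (g.getD k ' ' ≠ s.getD k ' '))
      with _ | ⟨k, _ | ⟨k2, rest⟩⟩
    · rw [hD] at hone; simp [pvOne] at hone
    · rw [hD] at hone
      simp only [List.map_cons, List.map_nil, pvOne, beq_iff_eq] at hone
      rw [PySem.List.pyGetD_natCast, PySem.List.pyGetD_natCast] at hone
      have hkmem : k ∈ (List.range s.length).filter
          (fun k => decide (g.getD k ' ' ≠ s.getD k ' ')) := by rw [hD]; simp
      simp only [List.mem_filter, List.mem_range, decide_eq_true_eq] at hkmem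
      obtain ⟨hkn, hqk⟩ := hkmem
      refine ⟨k, hkn, ?_, ?_⟩
      · rw [← hone]; exact fun hc => hqk hc.symm
      · apply List.ext_getElem
        · rw [hg, pvCand_length]
        · intro j hj1 hj2
          have hjs : j < s.length := by rw [pvCand_length] at hj2; exact hj2
          by_cases hjk : j = k
          · subst hjk
            rw [← List.getD_eq_getElem g ' ' hj1, ← List.getD_eq_getElem _ ' ' hj2,
              hone, pvCand_getD_self s e j hjs]
          · have hqj : g.getD j ' ' = s.getD j ' ' := by
              by_contra hqj
              have : j ∈ (List.range s.length).filter
                  (fun k => decide (g.getD k ' ' ≠ s.getD k ' ')) :=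
                List.mem_filter.mpr ⟨List.mem_range.mpr hjs,
                  by simp only [decide_eq_true_eq]; exact hqj⟩
              rw [hD] at this; simp at this; exact hjk this
            rw [← List.getD_eq_getElem g ' ' hj1, ← List.getD_eq_getElem _ ' ' hj2,
              hqj, pvCand_getD_ne s e k j hjs hjk]
    · rw [hD] at hone; simp [pvOne] at hone
  · rintro ⟨k, hkn, hne, rfl⟩
    have hfil : (List.range s.length).filter
        (fun j => decide ((pvCand s e k).getD j ' ' ≠ s.getD j ' ')) = [k] := by
      rw [← List.perm_singleton]
      rw [List.perm_ext_iff_of_nodup ((List.nodup_range).filter _) (by simp)]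
      intro j
      simp only [List.mem_filter, List.mem_range, List.mem_singleton, decide_eq_true_eq]
      constructor
      · rintro ⟨hjn, hqj⟩
        by_contra hjk
        exact hqj (pvCand_getD_ne s e k j hjn hjk)
      · rintro rfl
        refine ⟨hkn, ?_⟩
        rw [pvCand_getD_self s e j hkn]
        exact fun hc => hne hc.symm
    rw [hfil]
    simp only [List.map_cons, List.map_nil, pvOne, beq_iff_eq]
    rw [PySem.List.pyGetD_natCast, PySem.List.pyGetD_natCast]
    exact pvCand_getD_self s e k hkn

-- w : the candidate as a String
def pvW (s e : List Char) (k : Nat) : String := String.ofList (pvCand s e k)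

lemma pvW_eq_iff (s e : List Char) (k : Nat) (g : String) :
    pvW s e k = g ↔ pvCand s e k = g.toList := by
  unfold pvW
  constructor
  · rintro rfl; simp
  · intro h; rw [h]; simp

lemma pvCand_inj (s e : List Char) (i j : Nat) (hi : i < s.length)
    (pdi : s.getD i ' ' ≠ e.getD i ' ') (heq : pvCand s e i = pvCand s e j) : i = j := by
  by_contra hij
  have h1 := congrArg (fun l => l.getD i ' ') heq
  simp only at h1
  rw [pvCand_getD_self s e i hi, pvCand_getD_ne s e j i hi hij] at h1
  exact pdi h1.symm

lemma count_bij {α : Type} [DecidableEq α] (L : List α) (hL : L.Nodup) (n : Nat)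
    (p : Nat → Prop) [DecidablePred p] (w : Nat → α) (Q : α → Prop) [DecidablePred Q]
    (hinj : ∀ i j, i < n → j < n → p i → p j → w i = w j → i = j)
    (hQ : ∀ g, Q g ↔ ∃ k, k < n ∧ p k ∧ w k = g) :
    ((List.range n).map (fun k => if p k ∧ w k ∈ L then (1:Int) else 0)).sum
      = (L.map (fun g => if Q g then (1:Int) else 0)).sum := by
  rw [PySem.List.sum_map_ite_one_zero', PySem.List.sum_map_ite_one_zero']
  norm_cast
  rw [List.countP_eq_length_filter, List.countP_eq_length_filter]
  have hperm : (((List.range n).filter (fun k => decide (p k ∧ w k ∈ L))).map w).Perm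
      (L.filter (fun g => decide (Q g))) := by
    rw [List.perm_ext_iff_of_nodup]
    · intro g
      simp only [List.mem_map, List.mem_filter, List.mem_range, decide_eq_true_eq]
      constructor
      · rintro ⟨k, ⟨hk, hp, hm⟩, rfl⟩
        exact ⟨hm, (hQ _).mpr ⟨k, hk, hp, rfl⟩⟩
      · rintro ⟨hm, hq⟩
        obtain ⟨k, hk, hp, rfl⟩ := (hQ _).mp hq
        exact ⟨k, ⟨hk, hp, hm⟩, rfl⟩
    · refine List.Nodup.map_on ?_ ((List.nodup_range).filter _)
      intro i hi j hj hw
      simp only [List.mem_filter, List.mem_range, decide_eq_true_eq] at hi hj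
      exact hinj i j hi.1 hj.1 hi.2.1 hj.2.1 hw
    · exact hL.filter _
  have := hperm.length_eq
  simpa using this

-- ===== VERDICT (by name: the statement is the Claim_ definition above) =====
theorem minMutation_wrong_spec : Claim_equal_minMutation_wrong := by
  intro startGene endGene bank _hdom
  unfold Spec_minMutation_wrong minMutation_wrong minMutation_wrong_alt
  by_cases hguard : PySem.Str.len startGene ≠ PySem.Str.len endGene ∨ bank = []
  · simp only [if_pos hguard]
  · simp only [if_neg hguard]
    push Not at hguard
    obtain ⟨hlenI, _hbank⟩ := hguard
    rw [PySem.Str.len_eq, PySem.Str.len_eq] at hlenI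
    have hlen : startGene.toList.length = endGene.toList.length := by exact_mod_cast hlenI
    set s := startGene.toList with hs
    set e := endGene.toList with he
    set n := s.length with hn
    set p : Nat → Prop := fun k => s.getD k ' ' ≠ e.getD k ' ' with hp
    set S := PySem.Set.ofList bank with hS
    -- A side: fold to a sum over range n of two indicators
    have hA : (PySem.List.enumerate (s.zip e) 0).foldl
        (fun count p =>
          if p.2.1 ≠ p.2.2 then
            let temp1 := String.ofList
              (PySem.List.slice s none (some p.1) ++ [p.2.2] ++
                PySem.List.slice s (some (p.1 + 1)) none)
            let temp2 := String.ofList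
              (PySem.List.slice e none (some p.1) ++ [p.2.1] ++
                PySem.List.slice e (some (p.1 + 1)) none)
            let count := if bank.contains temp1 then count + 1 else count
            if bank.contains temp2 then count + 1 else count
          else count) 0
        = ((List.range n).map (fun k =>
            (if p k ∧ pvW s e k ∈ S then (1:Int) else 0) +
            (if p k ∧ pvW e s k ∈ S then (1:Int) else 0))).sum := by
      rw [show (fun (count : Int) (q : Int × Char × Char) =>
          if q.2.1 ≠ q.2.2 then
            let temp1 := String.ofList
              (PySem.List.slice s none (some q.1) ++ [q.2.2] ++
                PySem.List.slice s (some (q.1 + 1)) none)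
            let temp2 := String.ofList
              (PySem.List.slice e none (some q.1) ++ [q.2.1] ++
                PySem.List.slice e (some (q.1 + 1)) none)
            let count := if bank.contains temp1 then count + 1 else count
            if bank.contains temp2 then count + 1 else count
          else count)
        = (fun (count : Int) (q : Int × Char × Char) => count +
            (if q.2.1 ≠ q.2.2 then
              (if bank.contains (String.ofList
                  (PySem.List.slice s none (some q.1) ++ [q.2.2] ++
                    PySem.List.slice s (some (q.1 + 1)) none)) then (1:Int) else 0) +
              (if bank.contains (String.ofList
                  (PySem.List.slice e none (some q.1) ++ [q.2.1] ++
                    PySem.List.slice e (some (q.1 + 1)) none)) then (1:Int) else 0)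
            else 0)) from by
          funext c q
          dsimp only
          split_ifs <;> ring]
      rw [PySem.List.foldl_add, zero_add]
      rw [PySem.List.enumerate_eq_map_pyRange (s.zip e) (' ', ' '), List.map_map,
        PySem.List.pyRange_one]
      simp only [PySem.List.len, sub_zero, Int.toNat_natCast, List.map_map]
      rw [show (s.zip e).length = n from by rw [List.length_zip, ← hlen]; exact min_self _]
      congr 1
      apply List.map_congr_left
      intro k hk
      rw [List.mem_range] at hk
      have hke : k < e.length := by omega
      have hzk : k < (s.zip e).length := by rw [List.length_zip, ← hlen]; omega
      have hpg : PySem.List.pyGetD (s.zip e) ((k:Nat) : Int) (' ', ' ') = (s[k], e[k]) := by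
        rw [PySem.List.pyGetD_natCast, List.getD_eq_getElem _ _ hzk, List.getElem_zip]
      simp only [Function.comp, zero_add]
      simp only [hpg]
      have hc1 : (↑k : Int) + 1 = ((k + 1 : Nat) : Int) := by push_cast; ring
      rw [PySem.List.slice_to_natCast, PySem.List.slice_to_natCast, hc1,
        PySem.List.slice_from_natCast, PySem.List.slice_from_natCast]
      have hset : ∀ (l : List Char) (c : Char), k < l.length →
          l.take k ++ [c] ++ l.drop (k+1) = l.set k c := by
        intro l c hkl
        rw [List.set_eq_take_append_cons_drop, if_pos hkl, List.append_assoc,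
          List.singleton_append]
      rw [hset s e[k] hk, hset e s[k] hke]
      have hw1 : s.set k e[k] = pvCand s e k := by
        rw [pvCand, List.getD_eq_getElem e ' ' hke]
      have hw2 : e.set k s[k] = pvCand e s k := by
        rw [pvCand, List.getD_eq_getElem s ' ' hk]
      rw [hw1, hw2]
      have hpd : (s[k] ≠ e[k]) ↔ p k := by
        show s[k] ≠ e[k] ↔ s.getD k ' ' ≠ e.getD k ' '
        rw [List.getD_eq_getElem s ' ' hk, List.getD_eq_getElem e ' ' hke]
      have hb1 : (String.ofList (pvCand s e k) ∈ bank) ↔ pvW s e k ∈ S := by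
        rw [hS, PySem.Set.mem_ofList]; exact Iff.rfl
      have hb2 : (String.ofList (pvCand e s k) ∈ bank) ↔ pvW e s k ∈ S := by
        rw [hS, PySem.Set.mem_ofList]; exact Iff.rfl
      by_cases h1 : p k
      · rw [if_pos (hpd.mpr h1)]
        by_cases h2 : pvW s e k ∈ S <;> by_cases h3 : pvW e s k ∈ S <;>
          simp [hb1, hb2, h1, h2, h3]
      · rw [if_neg (fun hc => h1 (hpd.mp hc))]
        simp [h1]
    -- B side: fold to a sum over the distinct bank genes
    have hB : S.foldl
        (fun total g =>
          if PySem.Str.len g = PySem.Str.len startGene then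
            let total := if pvOne (pvDiffs g.toList s) g.toList e then total + 1 else total
            if pvOne (pvDiffs g.toList e) g.toList s then total + 1 else total
          else total) 0
        = (S.map (fun g =>
            (if (∃ k, k < n ∧ p k ∧ pvW s e k = g) then (1:Int) else 0) +
            (if (∃ k, k < n ∧ p k ∧ pvW e s k = g) then (1:Int) else 0))).sum := by
      rw [show (fun (total : Int) (g : String) =>
          if PySem.Str.len g = PySem.Str.len startGene then
            let total := if pvOne (pvDiffs g.toList s) g.toList e then total + 1 else total
            if pvOne (pvDiffs g.toList e) g.toList s then total + 1 else total
          else total)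
        = (fun (total : Int) (g : String) => total +
            (if PySem.Str.len g = PySem.Str.len startGene then
              (if pvOne (pvDiffs g.toList s) g.toList e then (1:Int) else 0) +
              (if pvOne (pvDiffs g.toList e) g.toList s then (1:Int) else 0)
            else 0)) from by
          funext t g
          dsimp only
          split_ifs <;> ring]
      rw [PySem.List.foldl_add, zero_add]
      congr 1
      apply List.map_congr_left
      intro g _hg
      by_cases hlg : PySem.Str.len g = PySem.Str.len startGene
      · rw [if_pos hlg]
        have hglen : g.toList.length = s.length := by
          rw [PySem.Str.len_eq, PySem.Str.len_eq, ← hs] at hlg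
          exact_mod_cast hlg
        have hglene : g.toList.length = e.length := by rw [hglen]; exact hlen
        have hiff1 : (pvOne (pvDiffs g.toList s) g.toList e = true)
            ↔ (∃ k, k < n ∧ p k ∧ pvW s e k = g) := by
          rw [pvOne_iff s e g.toList hglen]
          constructor
          · rintro ⟨k, hk, hpk, hgc⟩
            exact ⟨k, hk, hpk, (pvW_eq_iff s e k g).mpr hgc.symm⟩
          · rintro ⟨k, hk, hpk, hw⟩
            exact ⟨k, hk, hpk, ((pvW_eq_iff s e k g).mp hw).symm⟩
        have hiff2 : (pvOne (pvDiffs g.toList e) g.toList s = true)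
            ↔ (∃ k, k < n ∧ p k ∧ pvW e s k = g) := by
          rw [pvOne_iff e s g.toList hglene]
          constructor
          · rintro ⟨k, hk, hpk, hgc⟩
            exact ⟨k, by omega, fun hc => hpk hc.symm, (pvW_eq_iff e s k g).mpr hgc.symm⟩
          · rintro ⟨k, hk, hpk, hw⟩
            exact ⟨k, by omega, fun hc => hpk hc.symm, ((pvW_eq_iff e s k g).mp hw).symm⟩
        rw [if_congr hiff1 rfl rfl, if_congr hiff2 rfl rfl]
      · rw [if_neg hlg]
        have hlen_of : ∀ (l : List Char), l = g.toList → l.length = s.length → False := by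
          intro l hlg2 hll
          apply hlg
          rw [PySem.Str.len_eq, PySem.Str.len_eq, ← hs]
          rw [← hlg2, hll]
        have hq1 : ¬ (∃ k, k < n ∧ p k ∧ pvW s e k = g) := by
          rintro ⟨k, hk, hpk, hw⟩
          exact hlen_of _ ((pvW_eq_iff s e k g).mp hw) (pvCand_length s e k)
        have hq2 : ¬ (∃ k, k < n ∧ p k ∧ pvW e s k = g) := by
          rintro ⟨k, hk, hpk, hw⟩
          refine hlen_of _ ((pvW_eq_iff e s k g).mp hw) ?_
          rw [pvCand_length e s k]
          exact hlen.symm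
        rw [if_neg hq1, if_neg hq2]
        norm_num
    rw [hA, hB]
    rw [PySem.List.sum_map_add_int, PySem.List.sum_map_add_int]
    congr 1
    · exact count_bij S (PySem.Set.nodup_ofList bank) n p (pvW s e) _
        (fun i j hi _ pdi _ hw =>
          pvCand_inj s e i j hi pdi (by
            have h2 := congrArg String.toList hw
            simpa only [pvW, String.toList_ofList] using h2))
        (fun g => Iff.rfl)
    · exact count_bij S (PySem.Set.nodup_ofList bank) n p (pvW e s) _
        (fun i j hi _ pdi _ hw =>
          pvCand_inj e s i j (by omega) (fun hc => pdi hc.symm)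
            (by
              have h2 := congrArg String.toList hw
              simpa only [pvW, String.toList_ofList] using h2))
        (fun g => Iff.rfl)
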